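-- pv_equiv track=rewrite | github.com/shoumikhoque/hello-world | coding-interview-patterns/18-Graph/bus_routes.py | minimum_buses
-- ===== SOURCE A (Python) =====
-- from collections import deque
--
-- def minimum_buses(routes, src, dest):
--     adj_list={}
--     for i , stations in enumerate(routes):
--         for station in stations:
--             if station not in adj_list:
--                 adj_list[station]=[]
--             adj_list[station].append(i)
--     queue=deque()
--     queue.append([src,0])
--     visited_buses=set()
--     while queue:
--         station,buses_taken=queue.popleft()
--         if station==dest:
--             return buses_taken
--         if station in adj_list:
--             for bus in adj_list[station]:
--                 if bus not in visited_buses: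
--                     for s in routes[bus]:
--                         queue.append([s,buses_taken+1])
--                     visited_buses.add(bus)
--     return -1
-- ===== SOURCE B (Python) =====
-- def minimum_buses(routes, src, dest):
--     # BFS over buses (routes) instead of stations; returns the same bus count.
--     if src == dest:
--         return 0
--     station_to_buses = {}
--     for i, stations in enumerate(routes):
--         for s in stations:
--             station_to_buses.setdefault(s, []).append(i)
--     visited = set()
--     frontier = []
--     for b in station_to_buses.get(src, []):
--         if b not in visited:
--             visited.add(b)
--             frontier.append(b)
--     k = 1
--     while frontier:
--         if any(dest in routes[b] for b in frontier):
--             return k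
--         nxt = []
--         for b in frontier:
--             for s in routes[b]:
--                 for j in station_to_buses[s]:
--                     if j not in visited:
--                         visited.add(j)
--                         nxt.append(j)
--         frontier = nxt
--         k += 1
--     return -1
-- ===== Notes on version B (the rewrite author's own statement) =====
-- stated objective: alternative
-- what changed: A runs a queue-based BFS over individual stations with (station, buses_taken) entries; B returns 0 early for src==dest and then runs a level-synchronous BFS over buses (routes), seeding with the buses through src and expanding one bus layer per step via the station->buses index.
import Mathlib
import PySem

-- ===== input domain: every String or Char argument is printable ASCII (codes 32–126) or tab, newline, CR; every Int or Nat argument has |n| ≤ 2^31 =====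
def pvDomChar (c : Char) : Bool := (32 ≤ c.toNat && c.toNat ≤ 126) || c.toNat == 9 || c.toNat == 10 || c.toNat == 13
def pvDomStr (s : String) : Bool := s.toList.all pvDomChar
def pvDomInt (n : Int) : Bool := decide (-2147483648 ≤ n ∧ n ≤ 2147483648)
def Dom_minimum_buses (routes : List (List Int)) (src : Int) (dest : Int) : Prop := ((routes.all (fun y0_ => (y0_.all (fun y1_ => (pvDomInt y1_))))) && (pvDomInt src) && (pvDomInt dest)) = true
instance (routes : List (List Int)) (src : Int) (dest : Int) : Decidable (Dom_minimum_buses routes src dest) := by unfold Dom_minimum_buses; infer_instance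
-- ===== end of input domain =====

-- B is a level-synchronous BFS over buses instead of A's queue BFS over stations; same return value.

-- ===== PORT A =====
-- adj_list building: 'if station not in adj_list: adj_list[station]=[]' then 'adj_list[station].append(i)'
def pvBuildAdjA (routes : List (List Int)) : PySem.Dict Int (List Int) :=
  (PySem.List.enumerate routes 0).foldl
    (fun d p =>
      p.2.foldl (fun d s =>
        let d1 := if d.contains s then d else d.insert s []
        d1.insert s (d1.getD s [] ++ [p.1])) d)
    PySem.Dict.empty

-- body of 'for bus in adj_list[station]: if bus not in visited_buses: …'
-- routes[bus] is ported as pyGetD routes bus [] — exact here since every bus index stored in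
-- adj_list comes from enumerate(routes) and is in range.
def pvAStep (routes : List (List Int)) (bt : Int)
    (acc : List (Int × Int) × PySem.Set Int) (bus : Int) : List (Int × Int) × PySem.Set Int :=
  if PySem.Set.contains acc.2 bus then acc
  else (acc.1 ++ (PySem.List.pyGetD routes bus []).map (fun s => (s, bt + 1)), PySem.Set.add acc.2 bus)

-- 'while queue:' loop; fuel is only a totality guard (proved sufficient below)
def pvALoop (routes : List (List Int)) (adj : PySem.Dict Int (List Int)) (dest : Int) :
    List (Int × Int) → PySem.Set Int → Nat → Int
  | _, _, 0 => -1
  | [], _, _+1 => -1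
  | (station, bt) :: rest, visited, fuel+1 =>
    if station = dest then bt
    else
      let st := (adj.getD station []).foldl (pvAStep routes bt) (rest, visited)
      pvALoop routes adj dest st.1 st.2 fuel

def pvFuelA (routes : List (List Int)) : Nat :=
  (∑ i ∈ Finset.range routes.length, (PySem.List.pyGetD routes (i : Int) []).length) + 1

def minimum_buses (routes : List (List Int)) (src : Int) (dest : Int) : Int :=
  let adj := pvBuildAdjA routes
  pvALoop routes adj dest [(src, 0)] PySem.Set.empty (pvFuelA routes)

-- ===== PORT B =====
-- 'station_to_buses.setdefault(s, []).append(i)'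
def pvBuildAdjB (routes : List (List Int)) : PySem.Dict Int (List Int) :=
  (PySem.List.enumerate routes 0).foldl
    (fun d p => p.2.foldl (fun d s => d.insert s (d.getD s [] ++ [p.1])) d)
    PySem.Dict.empty

-- 'if j not in visited: visited.add(j); out.append(j)'
def pvAddBus (acc : List Int × PySem.Set Int) (j : Int) : List Int × PySem.Set Int :=
  if PySem.Set.contains acc.2 j then acc else (acc.1 ++ [j], PySem.Set.add acc.2 j)

-- 'while frontier:' loop of B; fuel is only a totality guard (proved sufficient below).
-- station_to_buses[s] and routes[b] are ported with getD/pyGetD — exact, the keys/indices are always present.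
def pvBLoop (routes : List (List Int)) (adj : PySem.Dict Int (List Int)) (dest : Int) :
    List Int → PySem.Set Int → Int → Nat → Int
  | _, _, _, 0 => -1
  | frontier, visited, k, fuel+1 =>
    if frontier = [] then -1
    else if frontier.any (fun b => (PySem.List.pyGetD routes b []).contains dest) then k
    else
      let st := frontier.foldl
        (fun acc b => (PySem.List.pyGetD routes b []).foldl
          (fun acc s => (adj.getD s []).foldl pvAddBus acc) acc)
        ([], visited)
      pvBLoop routes adj dest st.1 st.2 (k+1) fuel

def minimum_buses_alt (routes : List (List Int)) (src : Int) (dest : Int) : Int :=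
  if src = dest then 0
  else
    let adj := pvBuildAdjB routes
    let seed := (adj.getD src []).foldl pvAddBus ([], PySem.Set.empty)
    pvBLoop routes adj dest seed.1 seed.2 1 (routes.length + 2)

-- ===== PRECONDITION & SPEC =====
def Spec_minimum_buses (routes : List (List Int)) (src : Int) (dest : Int) (out : Int) : Prop := out = minimum_buses_alt routes src dest
instance (routes : List (List Int)) (src : Int) (dest : Int) (out : Int) : Decidable (Spec_minimum_buses routes src dest out) := by unfold Spec_minimum_buses; infer_instance

-- ===== CLAIM (what is proved, stated in full; the proofs are below) =====
def Claim_equal_minimum_buses : Prop := ∀ (routes : List (List Int)) (src : Int) (dest : Int), Dom_minimum_buses routes src dest → Spec_minimum_buses routes src dest (minimum_buses routes src dest)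

-- ===== LEMMAS AND PROOFS =====

-- abbreviation used only in proofs
def pvR (routes : List (List Int)) (b : Int) : List Int := PySem.List.pyGetD routes b []

-- "same getD view" relation between the two station indexes
def pvDEq (d d' : PySem.Dict Int (List Int)) : Prop := ∀ s : Int, d.getD s [] = d'.getD s []

-- getD after A's two-step insert ('if absent: d[s]=[]' then append)
lemma stepA_getD (d : PySem.Dict Int (List Int)) (s i s' : Int) :
    ((if d.contains s then d else d.insert s []).insert s
      ((if d.contains s then d else d.insert s []).getD s [] ++ [i])).getD s' []
    = if s' = s then d.getD s [] ++ [i] else d.getD s' [] := by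
  by_cases h : d.contains s
  · simp only [if_pos h, PySem.Dict.getD_insert]
  · have h0 : d.getD s [] = [] := PySem.Dict.getD_of_not_contains d [] (by simpa using h)
    simp only [if_neg h, PySem.Dict.getD_insert]
    by_cases hs : s' = s <;> simp [hs, h0]

lemma inner_build_DEq (i : Int) (st : List Int) :
    ∀ (d d' : PySem.Dict Int (List Int)), pvDEq d d' →
    pvDEq (st.foldl (fun d s => d.insert s (d.getD s [] ++ [i])) d)
      (st.foldl (fun d s =>
        let d1 := if d.contains s then d else d.insert s []
        d1.insert s (d1.getD s [] ++ [i])) d') := by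
  induction st with
  | nil => intro d d' h; exact h
  | cons s st ih =>
    intro d d' h
    apply ih
    intro s'
    rw [PySem.Dict.getD_insert, stepA_getD, h s]
    by_cases hs : s' = s <;> simp [hs, h s']

lemma build_DEq (routes : List (List Int)) : pvDEq (pvBuildAdjB routes) (pvBuildAdjA routes) := by
  unfold pvBuildAdjB pvBuildAdjA
  generalize (PySem.List.enumerate routes 0) = l
  have : ∀ (l : List (Int × List Int)) (d d' : PySem.Dict Int (List Int)), pvDEq d d' →
      pvDEq (l.foldl (fun d p => p.2.foldl (fun d s => d.insert s (d.getD s [] ++ [p.1])) d) d)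
        (l.foldl (fun d p => p.2.foldl (fun d s =>
          let d1 := if d.contains s then d else d.insert s []
          d1.insert s (d1.getD s [] ++ [p.1])) d) d') := by
    intro l
    induction l with
    | nil => intro d d' h; exact h
    | cons p l ih => intro d d' h; exact ih _ _ (inner_build_DEq p.1 p.2 d d' h)
  exact this l _ _ (fun s => rfl)

-- what pvBuildAdjA stores: only bus indices in range whose route contains the station
lemma inner_build_inv (Q : Int → Int → Prop) (i : Int) (st : List Int) :
    (∀ s ∈ st, Q i s) →
    ∀ (d : PySem.Dict Int (List Int)), (∀ s b, b ∈ d.getD s [] → Q b s) →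
    ∀ s b, b ∈ ((st.foldl (fun d s =>
        let d1 := if d.contains s then d else d.insert s []
        d1.insert s (d1.getD s [] ++ [i])) d).getD s []) → Q b s := by
  induction st with
  | nil => intro _ d hd; exact hd
  | cons s st ihs =>
    intro hin d hd
    simp only [List.foldl_cons]
    apply ihs (fun q hq => hin q (List.mem_cons_of_mem _ hq))
    intro s' b hb
    rw [stepA_getD] at hb
    by_cases hs : s' = s
    · subst hs
      rw [if_pos rfl] at hb
      rcases List.mem_append.1 hb with h1 | h1
      · exact hd _ _ h1
      · rw [List.mem_singleton.1 h1]; exact hin s' (List.mem_cons_self ..)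
    · rw [if_neg hs] at hb; exact hd _ _ hb

lemma build_fold_inv (Q : Int → Int → Prop) (l : List (Int × List Int)) :
    (∀ p ∈ l, ∀ s ∈ p.2, Q p.1 s) →
    ∀ (d : PySem.Dict Int (List Int)), (∀ s b, b ∈ d.getD s [] → Q b s) →
    ∀ s b, b ∈ ((l.foldl (fun d p => p.2.foldl (fun d s =>
        let d1 := if d.contains s then d else d.insert s []
        d1.insert s (d1.getD s [] ++ [p.1])) d) d).getD s []) → Q b s := by
  induction l with
  | nil => intro _ d hd; exact hd
  | cons p l ih =>
    intro hl d hd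
    simp only [List.foldl_cons]
    exact ih (fun q hq => hl q (List.mem_cons_of_mem _ hq)) _
      (inner_build_inv Q p.1 p.2 (hl p (List.mem_cons_self ..)) d hd)

lemma adj_mem (routes : List (List Int)) (s b : Int)
    (h : b ∈ (pvBuildAdjA routes).getD s []) :
    0 ≤ b ∧ b < (routes.length : Int) ∧ s ∈ pvR routes b := by
  refine build_fold_inv (fun b s => 0 ≤ b ∧ b < (routes.length : Int) ∧ s ∈ pvR routes b)
    (PySem.List.enumerate routes 0) ?_ PySem.Dict.empty ?_ s b (by exact h)
  · intro p hp s' hs'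
    rcases (PySem.List.mem_enumerate_iff routes 0 p).1 hp with ⟨k, hk, rfl⟩
    simp only [zero_add]
    refine ⟨by positivity, by exact_mod_cast hk, ?_⟩
    rw [pvR, PySem.List.pyGetD_natCast, List.getD_eq_getElem _ _ hk]
    simpa using hs'
  · intro s' b'; simp [PySem.Dict.getD_empty]

-- fold of pvAddBus factors through the empty accumulator
lemma addbus_factor (L : List Int) : ∀ (nb : List Int) (v : PySem.Set Int),
    L.foldl pvAddBus (nb, v)
      = (nb ++ (L.foldl pvAddBus ([], v)).1, (L.foldl pvAddBus ([], v)).2) := by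
  induction L with
  | nil => simp
  | cons j L ih =>
    intro nb v
    simp only [List.foldl_cons, pvAddBus]
    by_cases h : PySem.Set.contains v j = true
    · simp only [if_pos h]; exact ih nb v
    · simp only [if_neg h, List.nil_append]
      rw [ih (nb ++ [j]), ih [j]]
      simp

-- structure of the pvAddBus fold: visited grows by exactly the emitted (fresh, nodup) buses
lemma addbus_spec (L : List Int) : ∀ (v : PySem.Set Int), v.Nodup →
    (L.foldl pvAddBus ([], v)).2 = v ++ (L.foldl pvAddBus ([], v)).1
      ∧ (v ++ (L.foldl pvAddBus ([], v)).1).Nodup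
      ∧ (∀ j ∈ (L.foldl pvAddBus ([], v)).1, j ∈ L) := by
  induction L with
  | nil => intro v hv; simpa using hv
  | cons j L ih =>
    intro v hv
    simp only [List.foldl_cons, pvAddBus]
    by_cases h : PySem.Set.contains v j = true
    · simp only [if_pos h]
      rcases ih v hv with ⟨h1, h2, h3⟩
      exact ⟨h1, h2, fun x hx => List.mem_cons_of_mem _ (h3 x hx)⟩
    · simp only [if_neg h, List.nil_append]
      have hj : j ∉ v := fun hmem => h ((PySem.Set.contains_iff v j).2 hmem)
      have hadd : PySem.Set.add v j = v ++ [j] := PySem.Set.add_of_not_mem hj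
      rw [addbus_factor, hadd]
      have hnd' : (v ++ [j]).Nodup := by rw [← hadd]; exact PySem.Set.nodup_add v j hv
      rcases ih (v ++ [j]) hnd' with ⟨h1, h2, h3⟩
      refine ⟨by simpa [List.append_assoc] using h1, by simpa [List.append_assoc] using h2, ?_⟩
      intro x hx
      simp only at hx
      rcases List.mem_append.1 hx with h4 | h4
      · simp at h4; simp [h4]
      · exact List.mem_cons_of_mem _ (h3 x h4)

-- A's inner per-station fold is B's pvAddBus fold with the new buses' stations appended to the queue
lemma inner_corr (routes : List (List Int)) (bt : Int) (L : List Int) :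
    ∀ (q : List (Int × Int)) (v : PySem.Set Int),
    L.foldl (pvAStep routes bt) (q, v)
      = (q ++ ((L.foldl pvAddBus ([], v)).1).flatMap
            (fun j => (pvR routes j).map (fun s => (s, bt + 1))),
         (L.foldl pvAddBus ([], v)).2) := by
  induction L with
  | nil => simp
  | cons j L ih =>
    intro q v
    simp only [List.foldl_cons, pvAStep, pvAddBus]
    by_cases h : PySem.Set.contains v j = true
    · simp only [if_pos h]; exact ih q v
    · simp only [if_neg h, List.nil_append]
      rw [ih, addbus_factor L [j]]
      simp [pvR, List.append_assoc]

-- the per-level scan over a station list, as a fold of pvAddBus over the flattened adjacency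
def pvScan (adj : PySem.Dict Int (List Int)) (S : List Int) (v : PySem.Set Int) :
    List Int × PySem.Set Int :=
  (S.flatMap (fun s => adj.getD s [])).foldl pvAddBus ([], v)

lemma scan_factor (adj : PySem.Dict Int (List Int)) (S : List Int) (nb : List Int) (v : PySem.Set Int) :
    (S.flatMap (fun s => adj.getD s [])).foldl pvAddBus (nb, v)
      = (nb ++ (pvScan adj S v).1, (pvScan adj S v).2) := by
  rw [pvScan, addbus_factor]

-- A's queue BFS, run on a level of stations S that does not contain dest, consumes |S| fuel
lemma A_level (routes : List (List Int)) (dest : Int) (k : Int) :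
    ∀ (S : List Int) (Q : List (Int × Int)) (v : PySem.Set Int) (fuel : Nat),
    dest ∉ S →
    pvALoop routes (pvBuildAdjA routes) dest (S.map (fun s => (s, k)) ++ Q) v (S.length + fuel)
      = pvALoop routes (pvBuildAdjA routes) dest
          (Q ++ ((pvScan (pvBuildAdjA routes) S v).1).flatMap
              (fun j => (pvR routes j).map (fun s => (s, k + 1))))
          (pvScan (pvBuildAdjA routes) S v).2 fuel := by
  intro S
  induction S with
  | nil =>
    intro Q v fuel _
    simp [pvScan]
  | cons s S ih =>
    intro Q v fuel hd
    have hs : s ≠ dest := fun h => hd (by simp [h])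
    have hS : dest ∉ S := fun h => hd (List.mem_cons_of_mem _ h)
    have hlen : (s :: S).length + fuel = (S.length + fuel) + 1 := by simp; omega
    rw [hlen]
    simp only [List.map_cons, List.cons_append, pvALoop, if_neg hs]
    rw [inner_corr]
    -- the new state
    have hsplit : pvScan (pvBuildAdjA routes) (s :: S) v
        = ((((pvBuildAdjA routes).getD s []).foldl pvAddBus ([], v)).1
            ++ (pvScan (pvBuildAdjA routes) S (((pvBuildAdjA routes).getD s []).foldl pvAddBus ([], v)).2).1,
           (pvScan (pvBuildAdjA routes) S (((pvBuildAdjA routes).getD s []).foldl pvAddBus ([], v)).2).2) := by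
      rw [pvScan, List.flatMap_cons, List.foldl_append, addbus_factor]
      rw [scan_factor]
      simp
    rw [show (S.map (fun s => (s, k)) ++ Q) ++ (((pvBuildAdjA routes).getD s []).foldl pvAddBus ([], v)).1.flatMap
          (fun j => (pvR routes j).map (fun s => (s, k + 1)))
        = S.map (fun s => (s, k)) ++ (Q ++ (((pvBuildAdjA routes).getD s []).foldl pvAddBus ([], v)).1.flatMap
          (fun j => (pvR routes j).map (fun s => (s, k + 1)))) from by simp]
    rw [ih _ _ fuel hS, hsplit]
    simp [List.append_assoc]

-- if dest occurs in the level S, A returns the level's distance k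
lemma A_hit (routes : List (List Int)) (dest : Int) (k : Int) :
    ∀ (S : List Int) (Q : List (Int × Int)) (v : PySem.Set Int) (fuel : Nat),
    dest ∈ S →
    pvALoop routes (pvBuildAdjA routes) dest (S.map (fun s => (s, k)) ++ Q) v (S.length + fuel) = k := by
  intro S
  induction S with
  | nil => intro _ _ _ h; cases h
  | cons s S ih =>
    intro Q v fuel hd
    have hlen : (s :: S).length + fuel = (S.length + fuel) + 1 := by simp; omega
    rw [hlen]
    simp only [List.map_cons, List.cons_append, pvALoop]
    by_cases hs : s = dest
    · simp [hs]
    · rw [if_neg hs]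
      rcases List.mem_cons.1 hd with h | h
      · exact absurd h.symm hs
      · rw [inner_corr]
        rw [show (S.map (fun s => (s, k)) ++ Q) ++ (((pvBuildAdjA routes).getD s []).foldl pvAddBus ([], v)).1.flatMap
              (fun j => (pvR routes j).map (fun s => (s, k + 1)))
            = S.map (fun s => (s, k)) ++ (Q ++ (((pvBuildAdjA routes).getD s []).foldl pvAddBus ([], v)).1.flatMap
              (fun j => (pvR routes j).map (fun s => (s, k + 1)))) from by simp]
        exact ih _ _ fuel h

-- weight of the not-yet-visited buses
def pvUsum (routes : List (List Int)) (v : PySem.Set Int) : Nat :=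
  ∑ i ∈ Finset.range routes.length, (if ((i : Int) ∈ v) then 0 else (pvR routes (i : Int)).length)

lemma usum_step (routes : List (List Int)) (v : PySem.Set Int) (j : Int)
    (hj0 : 0 ≤ j) (hjn : j < (routes.length : Int)) (hjv : j ∉ v) :
    pvUsum routes v = pvUsum routes (v ++ [j]) + (pvR routes j).length := by
  have hjt : j.toNat < routes.length := by omega
  have hjcast : ((j.toNat : Int)) = j := Int.toNat_of_nonneg hj0
  unfold pvUsum
  have hpt : ∀ i ∈ Finset.range routes.length,
      (if ((i : Int) ∈ v) then 0 else (pvR routes (i : Int)).length)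
      = (if ((i : Int) ∈ v ++ [j]) then 0 else (pvR routes (i : Int)).length)
        + (if i = j.toNat then (pvR routes j).length else 0) := by
    intro i _
    by_cases hiv : (i : Int) ∈ v
    · have hij : i ≠ j.toNat := by
        intro h; rw [h, hjcast] at hiv; exact hjv hiv
      rw [if_pos hiv, if_pos (List.mem_append.2 (Or.inl hiv)), if_neg hij]
    · by_cases hij : (i : Int) = j
      · have hit : i = j.toNat := by omega
        rw [if_neg hiv, if_pos (List.mem_append.2 (Or.inr (by simp [hij]))), if_pos hit, hij]
        simp
      · have hit : i ≠ j.toNat := fun h => hij (by rw [h, hjcast])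
        have hmem : (i : Int) ∉ v ++ [j] := by
          simp only [List.mem_append, List.mem_singleton]
          rintro (h | h)
          · exact hiv h
          · exact hij h
        rw [if_neg hiv, if_neg hmem, if_neg hit]
        simp
  rw [Finset.sum_congr rfl hpt, Finset.sum_add_distrib]
  congr 1
  rw [Finset.sum_ite_eq' (Finset.range routes.length) j.toNat]
  simp [hjt]

lemma usum_append (routes : List (List Int)) :
    ∀ (new : List Int) (v : PySem.Set Int), new.Nodup → (∀ j ∈ new, j ∉ v) →
    (∀ j ∈ new, 0 ≤ j ∧ j < (routes.length : Int)) →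
    pvUsum routes v = pvUsum routes (v ++ new) + ((new.map (fun j => (pvR routes j).length)).sum) := by
  intro new
  induction new with
  | nil => intro v _ _ _; simp
  | cons j new ih =>
    intro v hnd hdisj hrange
    have hj := hrange j (List.mem_cons_self ..)
    rw [usum_step routes v j hj.1 hj.2 (hdisj j (List.mem_cons_self ..))]
    rw [ih (v ++ [j]) (List.Nodup.of_cons hnd) ?_ (fun x hx => hrange x (List.mem_cons_of_mem _ hx))]
    · simp [List.append_assoc]; omega
    · intro x hx
      simp only [List.mem_append, List.mem_singleton]
      rintro (h | rfl)
      · exact hdisj x (List.mem_cons_of_mem _ hx) h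
      · exact (List.nodup_cons.1 hnd).1 hx

lemma aloop_nil (routes : List (List Int)) (adj : PySem.Dict Int (List Int)) (dest : Int)
    (v : PySem.Set Int) (fuel : Nat) : pvALoop routes adj dest [] v fuel = -1 := by
  cases fuel <;> simp [pvALoop]

-- pvBLoop only looks at its dict through getD
lemma bloop_congr (routes : List (List Int)) (dest : Int) (adj adj' : PySem.Dict Int (List Int))
    (h : pvDEq adj adj') :
    ∀ (fuel : Nat) (frontier : List Int) (v : PySem.Set Int) (k : Int),
    pvBLoop routes adj dest frontier v k fuel = pvBLoop routes adj' dest frontier v k fuel := by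
  intro fuel
  induction fuel with
  | zero => intro _ _ _; simp [pvBLoop]
  | succ fuel ih =>
    intro frontier v k
    simp only [pvBLoop]
    have hst : (fun (acc : List Int × PySem.Set Int) b => (PySem.List.pyGetD routes b []).foldl
          (fun acc s => (adj.getD s []).foldl pvAddBus acc) acc)
        = (fun (acc : List Int × PySem.Set Int) b => (PySem.List.pyGetD routes b []).foldl
          (fun acc s => (adj'.getD s []).foldl pvAddBus acc) acc) := by
      funext acc b
      congr 1
      funext acc s
      rw [h s]
    rw [hst]
    split
    · rfl
    · split
      · rfl
      · exact ih _ _ _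

-- the main bridge: A's queue BFS on the stations of the current bus level equals B's bus-level BFS
lemma main_bridge (routes : List (List Int)) (dest : Int) :
    ∀ (fuelB : Nat) (frontier : List Int) (v : PySem.Set Int) (k : Int) (fuelA : Nat),
    v.Nodup →
    (∀ x ∈ v, 0 ≤ x ∧ x < (routes.length : Int)) →
    (∀ b ∈ frontier, 0 ≤ b ∧ b < (routes.length : Int) ∧ pvR routes b ≠ []) →
    fuelA ≥ (frontier.flatMap (pvR routes)).length + pvUsum routes v →
    1 ≤ fuelB →
    (frontier ≠ [] → routes.length - v.length + 2 ≤ fuelB) →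
    pvALoop routes (pvBuildAdjA routes) dest
        ((frontier.flatMap (pvR routes)).map (fun s => (s, k))) v fuelA
      = pvBLoop routes (pvBuildAdjA routes) dest frontier v k fuelB := by
  intro fuelB
  induction fuelB with
  | zero => intro _ _ _ _ _ _ _ _ h _; omega
  | succ fuelB ih =>
    intro frontier v k fuelA hv hvr hf hfa _ hfb
    by_cases hfe : frontier = []
    · subst hfe
      simp only [pvBLoop, if_pos, List.flatMap_nil, List.map_nil]
      exact aloop_nil ..
    · simp only [pvBLoop, if_neg hfe]
      set S := frontier.flatMap (pvR routes) with hSdef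
      by_cases hany : frontier.any (fun b => (PySem.List.pyGetD routes b []).contains dest) = true
      · rw [if_pos hany]
        have hdS : dest ∈ S := by
          rcases List.any_eq_true.1 hany with ⟨b, hb, hc⟩
          exact List.mem_flatMap.2 ⟨b, hb, by simpa [pvR] using hc⟩
        have hfuel : fuelA = S.length + (fuelA - S.length) := by omega
        rw [hfuel, ← List.append_nil (S.map (fun s => (s, k)))]
        exact A_hit routes dest k S [] v _ hdS
      · rw [if_neg hany]
        have hdS : dest ∉ S := by
          intro hmem
          rcases List.mem_flatMap.1 hmem with ⟨b, hb, hc⟩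
          exact hany (List.any_eq_true.2 ⟨b, hb, by simpa [pvR] using hc⟩)
        -- B's nested fold is the scan over the flattened station list
        have hst : frontier.foldl
            (fun acc b => (PySem.List.pyGetD routes b []).foldl
              (fun acc s => ((pvBuildAdjA routes).getD s []).foldl pvAddBus acc) acc)
            ([], v)
            = pvScan (pvBuildAdjA routes) S v := by
          rw [pvScan, List.foldl_flatMap, hSdef, List.foldl_flatMap]
          rfl
        have hfuel : fuelA = S.length + (fuelA - S.length) := by omega
        rw [hfuel, ← List.append_nil (S.map (fun s => (s, k)))]
        rw [A_level routes dest k S [] v _ hdS, List.nil_append]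
        set new := (pvScan (pvBuildAdjA routes) S v).1 with hnew
        set v' := (pvScan (pvBuildAdjA routes) S v).2 with hv'
        -- properties of the scan
        have hLmem : ∀ j ∈ S.flatMap (fun s => (pvBuildAdjA routes).getD s []),
            0 ≤ j ∧ j < (routes.length : Int) ∧ pvR routes j ≠ [] := by
          intro j hj
          rcases List.mem_flatMap.1 hj with ⟨s, _, hjs⟩
          rcases adj_mem routes s j hjs with ⟨h1, h2, h3⟩
          exact ⟨h1, h2, List.ne_nil_of_mem h3⟩
        have hscan : (S.flatMap (fun s => (pvBuildAdjA routes).getD s [])).foldl pvAddBus ([], v)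
            = pvScan (pvBuildAdjA routes) S v := rfl
        rcases addbus_spec (S.flatMap (fun s => (pvBuildAdjA routes).getD s [])) v hv
          with ⟨hveq, hvnd, hsub⟩
        rw [hscan] at hveq hvnd hsub
        rw [← hv', ← hnew] at hveq
        rw [← hnew] at hvnd hsub
        have hnewprop : ∀ b ∈ new, 0 ≤ b ∧ b < (routes.length : Int) ∧ pvR routes b ≠ [] :=
          fun b hb => hLmem b (hsub b hb)
        have hnewnd : new.Nodup := (List.nodup_append.1 hvnd).2.1
        have hnewdisj : ∀ j ∈ new, j ∉ v := by
          have hdisj := List.disjoint_of_nodup_append hvnd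
          intro j hj hjv
          exact hdisj hjv hj
        have husum : pvUsum routes v
            = pvUsum routes v' + ((new.map (fun j => (pvR routes j).length)).sum) := by
          rw [hveq]
          exact usum_append routes new v hnewnd hnewdisj (fun j hj => ⟨(hnewprop j hj).1, (hnewprop j hj).2.1⟩)
        -- rewrite the new queue as the next level's station list
        have hq : new.flatMap (fun j => (pvR routes j).map (fun s => (s, k + 1)))
            = (new.flatMap (pvR routes)).map (fun s => (s, k + 1)) := by
          rw [List.map_flatMap]
        rw [hq, hst]
        -- bound |v| ≤ routes.length
        have hvlen : v.length ≤ routes.length := by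
          have hsub2 : v ⊆ (List.range routes.length).map Int.ofNat := by
            intro x hx
            rcases hvr x hx with ⟨h1, h2⟩
            have hxx : x = ((x.toNat : Nat) : Int) := by omega
            have hmem2 : x.toNat ∈ List.range routes.length := List.mem_range.2 (by omega)
            rw [hxx]
            exact List.mem_map.2 ⟨x.toNat, hmem2, rfl⟩
          simpa using (List.Nodup.subperm hv hsub2).length_le
        have hv'len : v'.length = v.length + new.length := by
          rw [hveq, List.length_append]
        have hv'nd : v'.Nodup := by rw [hveq]; exact hvnd
        have hv'r : ∀ x ∈ v', 0 ≤ x ∧ x < (routes.length : Int) := by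
          intro x hx
          rw [hveq] at hx
          rcases List.mem_append.1 hx with h | h
          · exact hvr x h
          · exact ⟨(hnewprop x h).1, (hnewprop x h).2.1⟩
        have hv'le : v'.length ≤ routes.length := by
          have hsub2 : v' ⊆ (List.range routes.length).map Int.ofNat := by
            intro x hx
            rcases hv'r x hx with ⟨h1, h2⟩
            have hxx : x = ((x.toNat : Nat) : Int) := by omega
            have hmem2 : x.toNat ∈ List.range routes.length := List.mem_range.2 (by omega)
            rw [hxx]
            exact List.mem_map.2 ⟨x.toNat, hmem2, rfl⟩
          simpa using (List.Nodup.subperm hv'nd hsub2).length_le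
        apply ih new v' (k + 1) (fuelA - S.length)
        · exact hv'nd
        · exact hv'r
        · exact hnewprop
        · have hlink : S.length = (frontier.flatMap (pvR routes)).length := by rw [hSdef]
          have hlink2 : (new.flatMap (pvR routes)).length
              = (new.map (fun j => (pvR routes j).length)).sum := by
            rw [List.length_flatMap]
          omega
        · have := hfb hfe
          omega
        · intro hne
          have h1 := hfb hfe
          have h2 : 1 ≤ new.length := List.length_pos_iff.2 hne
          omega

lemma usum_empty (routes : List (List Int)) :
    pvUsum routes PySem.Set.empty
      = ∑ i ∈ Finset.range routes.length, (PySem.List.pyGetD routes (i : Int) []).length := by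
  unfold pvUsum
  refine Finset.sum_congr rfl ?_
  intro i _
  simp [PySem.Set.empty, pvR]

-- ===== VERDICT (by name: the statement is the Claim_ definition above) =====
theorem minimum_buses_spec : Claim_equal_minimum_buses := by
  intro routes src dest _
  show minimum_buses routes src dest = minimum_buses_alt routes src dest
  unfold minimum_buses minimum_buses_alt
  have hfA : pvFuelA routes
      = (∑ i ∈ Finset.range routes.length, (PySem.List.pyGetD routes (i : Int) []).length) + 1 := rfl
  rw [hfA]
  simp only [pvALoop]
  by_cases h : src = dest
  · simp [h]
  · rw [if_neg h, if_neg h]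
    rw [inner_corr]
    set L := (pvBuildAdjA routes).getD src [] with hL
    set new := (L.foldl pvAddBus ([], PySem.Set.empty)).1 with hnew
    set v0 := (L.foldl pvAddBus ([], PySem.Set.empty)).2 with hv0
    have hseed : (pvBuildAdjB routes).getD src [] = L := build_DEq routes src
    rw [hseed]
    rw [bloop_congr routes dest (pvBuildAdjB routes) (pvBuildAdjA routes) (build_DEq routes)]
    have hq : new.flatMap (fun j => (pvR routes j).map (fun s => (s, (0 : Int) + 1)))
        = (new.flatMap (pvR routes)).map (fun s => (s, (1 : Int))) := by
      rw [List.map_flatMap]; norm_num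
    rcases addbus_spec L PySem.Set.empty (by simp [PySem.Set.empty]) with ⟨hveq, hvnd, hsub⟩
    rw [← hv0, ← hnew] at hveq
    rw [← hnew] at hvnd hsub
    have hveq' : v0 = new := by simpa [PySem.Set.empty] using hveq
    have hnewprop : ∀ b ∈ new, 0 ≤ b ∧ b < (routes.length : Int) ∧ pvR routes b ≠ [] := by
      intro b hb
      rcases adj_mem routes src b (hsub b hb) with ⟨h1, h2, h3⟩
      exact ⟨h1, h2, List.ne_nil_of_mem h3⟩
    have husum : pvUsum routes PySem.Set.empty
        = pvUsum routes v0 + ((new.map (fun j => (pvR routes j).length)).sum) := by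
      have := usum_append routes new PySem.Set.empty (by simpa [PySem.Set.empty] using hvnd)
        (by simp [PySem.Set.empty]) (fun j hj => ⟨(hnewprop j hj).1, (hnewprop j hj).2.1⟩)
      rw [this, hveq']
      simp [PySem.Set.empty]
    rw [show (List.nil ++ new.flatMap (fun j => (pvR routes j).map (fun s => (s, (0:Int) + 1))))
        = new.flatMap (fun j => (pvR routes j).map (fun s => (s, (0:Int) + 1))) from List.nil_append _]
    rw [hq]
    apply main_bridge routes dest (routes.length + 2) new v0 1
      (∑ i ∈ Finset.range routes.length, (PySem.List.pyGetD routes (i : Int) []).length)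
    · rw [hveq']; simpa [PySem.Set.empty] using hvnd
    · intro x hx
      rw [hveq'] at hx
      exact ⟨(hnewprop x hx).1, (hnewprop x hx).2.1⟩
    · exact hnewprop
    · rw [List.length_flatMap]
      have h1 := usum_empty routes
      omega
    · omega
    · intro _; omega
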